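-- pv_equiv track=rewrite | github.com/Yasmine-Amouri/rock-paper-scissors | strategies/cycle.py | longest_consecutive_occ_cycle
-- ===== SOURCE A (Python) =====
-- def longest_consecutive_occ_cycle(cycle,size,L):
--
--     maxi = 0
--
--     i = 0
--
--     while(i<=(len(L)-size)):
--
--         if(L[i:(i+size)] == cycle):
--             cpt = 1
--             j = i+size
--
--             while((j<=(len(L)-size))and(L[j:j+size] == cycle)):
--                 cpt += 1
--                 j += size
--
--             maxi = max(maxi,cpt)
--
--             i = j
--         else:
--             i += 1
--
--     return maxi
-- ===== SOURCE B (Python) =====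
-- def longest_consecutive_occ_cycle(cycle, size, L):
--     n = len(L)
--     best = 0
--     cur = 0
--     i = 0
--     while i <= n - size:
--         if L[i:i+size] == cycle:
--             cur += 1
--             if cur > best:
--                 best = cur
--             i += size
--         else:
--             cur = 0
--             i += 1
--     return best
-- ===== Notes on version B (the rewrite author's own statement) =====
-- stated objective: simpler
-- what changed: A's nested while loops (an inner loop that counts a whole run and reports it with max at run end, plus an outer loop that jumps past it) are replaced by a single pass over positions carrying a running-count accumulator and a best-so-far that is updated at every match.
-- outside the precondition, e.g. on longest_consecutive_occ_cycle([1, 2], -1, [3]): A returns 0, B returns 0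
import Mathlib
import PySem

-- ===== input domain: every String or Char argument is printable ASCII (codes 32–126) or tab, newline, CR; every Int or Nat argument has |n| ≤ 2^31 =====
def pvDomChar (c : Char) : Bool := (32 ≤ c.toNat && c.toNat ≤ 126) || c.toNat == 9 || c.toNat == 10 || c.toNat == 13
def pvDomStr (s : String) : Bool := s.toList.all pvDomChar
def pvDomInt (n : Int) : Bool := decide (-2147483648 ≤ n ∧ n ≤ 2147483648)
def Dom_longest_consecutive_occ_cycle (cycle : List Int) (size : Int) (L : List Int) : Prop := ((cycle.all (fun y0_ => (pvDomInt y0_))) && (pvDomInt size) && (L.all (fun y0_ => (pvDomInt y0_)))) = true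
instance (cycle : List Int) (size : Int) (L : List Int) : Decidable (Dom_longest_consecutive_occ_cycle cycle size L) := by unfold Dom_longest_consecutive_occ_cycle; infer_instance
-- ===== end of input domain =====

-- B replaces A's nested while loops (inner run counter + outer jump) by a single pass with a
-- running-count accumulator; same cost, simpler control flow.

-- ===== PORT A =====
-- inner while: while (j <= len(L)-size) and (L[j:j+size] == cycle): cpt += 1; j += size
-- fuel (L.length + 2) totalizes the while loops; on Pre_ inputs it is never exhausted.
def pvAInner (cycle : List Int) (size : Int) (L : List Int) : Nat → Int → Int → Int × Int
  | 0, cpt, j => (cpt, j)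
  | fuel+1, cpt, j =>
    if j ≤ (L.length : Int) - size ∧ PySem.List.slice L (some j) (some (j + size)) = cycle then
      pvAInner cycle size L fuel (cpt + 1) (j + size)
    else (cpt, j)

-- outer while: while i <= len(L)-size: if L[i:i+size] == cycle: …; maxi = max(maxi,cpt); i = j else i += 1
def pvAOuter (cycle : List Int) (size : Int) (L : List Int) : Nat → Int → Int → Int
  | 0, _, maxi => maxi
  | fuel+1, i, maxi =>
    if i ≤ (L.length : Int) - size then
      if PySem.List.slice L (some i) (some (i + size)) = cycle then
        pvAOuter cycle size L fuel
          (pvAInner cycle size L (L.length + 2) 1 (i + size)).2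
          (max maxi (pvAInner cycle size L (L.length + 2) 1 (i + size)).1)
      else
        pvAOuter cycle size L fuel (i + 1) maxi
    else maxi

def longest_consecutive_occ_cycle (cycle : List Int) (size : Int) (L : List Int) : Int :=
  pvAOuter cycle size L (L.length + 2) 0 0

-- ===== PORT B =====
-- single while: if L[i:i+size] == cycle: cur += 1; best updated; i += size else: cur = 0; i += 1
def pvBLoop (cycle : List Int) (size : Int) (L : List Int) : Nat → Int → Int → Int → Int
  | 0, _, _, best => best
  | fuel+1, i, cur, best =>
    if i ≤ (L.length : Int) - size then
      if PySem.List.slice L (some i) (some (i + size)) = cycle then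
        pvBLoop cycle size L fuel (i + size) (cur + 1) (if cur + 1 > best then cur + 1 else best)
      else
        pvBLoop cycle size L fuel (i + 1) 0 best
    else best

def longest_consecutive_occ_cycle_alt (cycle : List Int) (size : Int) (L : List Int) : Int :=
  pvBLoop cycle size L (L.length + 2) 0 0 0

-- ===== PRECONDITION & SPEC =====
-- Pre_ excludes size < 0, and size = 0 with empty cycle: there Python A's while loops can run
-- forever (e.g. cycle=[1], size=-1, L=[1,2] or cycle=[], size=0, L=[1]), and where A does
-- return 0 that value is an accident of negative-slice wraparound.
def Pre_longest_consecutive_occ_cycle (cycle : List Int) (size : Int) (L : List Int) : Prop :=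
  1 ≤ size ∨ (size = 0 ∧ cycle ≠ [])
instance (cycle : List Int) (size : Int) (L : List Int) : Decidable (Pre_longest_consecutive_occ_cycle cycle size L) := by unfold Pre_longest_consecutive_occ_cycle; infer_instance

def pvWitness_longest_consecutive_occ_cycle : List Int × Int × List Int := ([1, 2], 2, [1, 2, 1, 2, 3])

def Spec_longest_consecutive_occ_cycle (cycle : List Int) (size : Int) (L : List Int) (out : Int) : Prop := out = longest_consecutive_occ_cycle_alt cycle size L
instance (cycle : List Int) (size : Int) (L : List Int) (out : Int) : Decidable (Spec_longest_consecutive_occ_cycle cycle size L out) := by unfold Spec_longest_consecutive_occ_cycle; infer_instance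

-- ===== CLAIM (what is proved, stated in full; the proofs are below) =====
def Claim_equal_longest_consecutive_occ_cycle : Prop := ∀ (cycle : List Int) (size : Int) (L : List Int), Dom_longest_consecutive_occ_cycle cycle size L → Pre_longest_consecutive_occ_cycle cycle size L → Spec_longest_consecutive_occ_cycle cycle size L (longest_consecutive_occ_cycle cycle size L)

-- ===== LEMMAS AND PROOFS =====

theorem pvWitness_ok : Dom_longest_consecutive_occ_cycle pvWitness_longest_consecutive_occ_cycle.1 pvWitness_longest_consecutive_occ_cycle.2.1 pvWitness_longest_consecutive_occ_cycle.2.2 ∧ Pre_longest_consecutive_occ_cycle pvWitness_longest_consecutive_occ_cycle.1 pvWitness_longest_consecutive_occ_cycle.2.1 pvWitness_longest_consecutive_occ_cycle.2.2 := by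
  decide

-- slice with equal endpoints is empty
theorem pvSlice_self (L : List Int) (i : Int) : PySem.List.slice L (some i) (some i) = [] := by
  have h : (PySem.List.slice L (some i) (some i)).length = 0 := by
    rw [PySem.List.length_slice]; omega
  exact List.length_eq_zero_iff.mp h

-- size = 0, cycle ≠ []: no slice can match, both loops leave the accumulator untouched
theorem pvAOuter_zero (cycle : List Int) (L : List Int) (hc : cycle ≠ []) :
    ∀ (f : Nat) (i m : Int), pvAOuter cycle 0 L f i m = m := by
  intro f
  induction f with
  | zero => intro i m; rfl
  | succ f ih =>
    intro i m
    by_cases h1 : i ≤ (L.length : Int) - 0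
    · by_cases h2 : PySem.List.slice L (some i) (some (i + 0)) = cycle
      · exfalso; rw [show i + (0:Int) = i by ring, pvSlice_self] at h2; exact hc h2.symm
      · simp only [pvAOuter, if_pos h1, if_neg h2]; exact ih (i + 1) m
    · simp only [pvAOuter, if_neg h1]

theorem pvBLoop_zero (cycle : List Int) (L : List Int) (hc : cycle ≠ []) :
    ∀ (f : Nat) (i c b : Int), pvBLoop cycle 0 L f i c b = b := by
  intro f
  induction f with
  | zero => intro i c b; rfl
  | succ f ih =>
    intro i c b
    by_cases h1 : i ≤ (L.length : Int) - 0
    · by_cases h2 : PySem.List.slice L (some i) (some (i + 0)) = cycle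
      · exfalso; rw [show i + (0:Int) = i by ring, pvSlice_self] at h2; exact hc h2.symm
      · simp only [pvBLoop, if_pos h1, if_neg h2]; exact ih (i + 1) 0 b
    · simp only [pvBLoop, if_neg h1]

-- the inner loop only moves j forward (size ≥ 1)
theorem pvAInner_snd_ge (cycle : List Int) (size : Int) (L : List Int) (hs : 1 ≤ size) :
    ∀ (f : Nat) (c j : Int), j ≤ (pvAInner cycle size L f c j).2 := by
  intro f
  induction f with
  | zero => intro c j; exact le_refl j
  | succ f ih =>
    intro c j
    simp only [pvAInner]
    split_ifs with h
    · have := ih (c + 1) (j + size); omega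
    · exact le_refl j

-- enough fuel ⇒ one more unit of fuel does not change pvAOuter
theorem pvAOuter_succ (cycle : List Int) (size : Int) (L : List Int) (hs : 1 ≤ size) :
    ∀ (f : Nat) (i m : Int), ((L.length : Int) + 1 - size - i).toNat + 1 ≤ f →
      pvAOuter cycle size L (f + 1) i m = pvAOuter cycle size L f i m := by
  intro f
  induction f with
  | zero => intro i m h; omega
  | succ f ih =>
    intro i m h
    by_cases h1 : i ≤ (L.length : Int) - size
    · by_cases h2 : PySem.List.slice L (some i) (some (i + size)) = cycle
      · simp only [pvAOuter, if_pos h1, if_pos h2]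
        have hj := pvAInner_snd_ge cycle size L hs (L.length + 2) 1 (i + size)
        exact ih _ _ (by omega)
      · simp only [pvAOuter, if_pos h1, if_neg h2]
        exact ih _ _ (by omega)
    · simp only [pvAOuter, if_neg h1]

theorem pvAOuter_fuel (cycle : List Int) (size : Int) (L : List Int) (hs : 1 ≤ size)
    (f g : Nat) (i m : Int) (hf : ((L.length : Int) + 1 - size - i).toNat + 1 ≤ f) (hfg : f ≤ g) :
    pvAOuter cycle size L g i m = pvAOuter cycle size L f i m := by
  induction g, hfg using Nat.le_induction with
  | base => rfl
  | succ g hg ih => rw [pvAOuter_succ cycle size L hs g i m (by omega), ih]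

-- main simulation: A's outer state (i, maxi) ↔ B's state (i, 0, maxi), and A's inner run
-- from (cur, j) ↔ B's state (j, cur, max maxi cur)
theorem pvSim (cycle : List Int) (size : Int) (L : List Int) (hs : 1 ≤ size) :
    ∀ f : Nat,
      (∀ i m : Int, 0 ≤ i → ((L.length : Int) + 1 - size - i).toNat + 1 ≤ f →
        pvAOuter cycle size L f i m = pvBLoop cycle size L f i 0 m) ∧
      (∀ (fI : Nat) (j cur m : Int), 0 ≤ j →
        ((L.length : Int) + 1 - size - j).toNat + 1 ≤ f →
        ((L.length : Int) + 1 - size - j).toNat + 1 ≤ fI →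
        pvAOuter cycle size L f (pvAInner cycle size L fI cur j).2
            (max m (pvAInner cycle size L fI cur j).1)
          = pvBLoop cycle size L f j cur (max m cur)) := by
  intro f
  induction f using Nat.strong_induction_on with
  | _ f IH =>
  constructor
  · -- Main f
    intro i m hi hf
    obtain ⟨f, rfl⟩ : ∃ f', f = f' + 1 := ⟨f - 1, by omega⟩
    by_cases h1 : i ≤ (L.length : Int) - size
    · by_cases h2 : PySem.List.slice L (some i) (some (i + size)) = cycle
      · simp only [pvAOuter, pvBLoop, if_pos h1, if_pos h2]
        have hrun := (IH f (by omega)).2 (L.length + 2) (i + size) 1 m (by omega)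
          (by omega) (by omega)
        rw [hrun, show ((0:Int) + 1) = 1 by norm_num]
        congr 1
        rw [max_def]; split_ifs <;> omega
      · simp only [pvAOuter, pvBLoop, if_pos h1, if_neg h2]
        exact (IH f (by omega)).1 (i + 1) m (by omega) (by omega)
    · simp only [pvAOuter, pvBLoop, if_neg h1]
  · -- Run f
    intro fI j cur m hj hf hfI
    obtain ⟨f, rfl⟩ : ∃ f', f = f' + 1 := ⟨f - 1, by omega⟩
    obtain ⟨fI, rfl⟩ : ∃ g, fI = g + 1 := ⟨fI - 1, by omega⟩
    by_cases hC : j ≤ (L.length : Int) - size ∧ PySem.List.slice L (some j) (some (j + size)) = cycle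
    · -- the inner loop (and B) both take a step
      simp only [pvAInner, if_pos hC]
      simp only [pvBLoop, if_pos hC.1, if_pos hC.2]
      have hX := pvAInner_snd_ge cycle size L hs fI (cur + 1) (j + size)
      rw [pvAOuter_fuel cycle size L hs f (f + 1) _ _ (by omega) (by omega)]
      have hrun := (IH f (by omega)).2 fI (j + size) (cur + 1) m (by omega) (by omega) (by omega)
      have hb : (if cur + 1 > max m cur then cur + 1 else max m cur) = max m (cur + 1) := by
        rw [max_def, max_def]; split_ifs <;> omega
      rw [hb]
      exact hrun
    · -- inner loop ends: A resumes the outer loop at j, B is at (j, cur, max m cur)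
      simp only [pvAInner, if_neg hC]
      by_cases h1 : j ≤ (L.length : Int) - size
      · have h2 : ¬ PySem.List.slice L (some j) (some (j + size)) = cycle := fun h => hC ⟨h1, h⟩
        simp only [pvAOuter, pvBLoop, if_pos h1, if_neg h2]
        exact (IH f (by omega)).1 (j + 1) (max m cur) (by omega) (by omega)
      · simp only [pvAOuter, pvBLoop, if_neg h1]

-- ===== VERDICT (by name: the statement is the Claim_ definition above) =====
theorem longest_consecutive_occ_cycle_spec : Claim_equal_longest_consecutive_occ_cycle := by
  intro cycle size L _ hpre
  unfold Spec_longest_consecutive_occ_cycle longest_consecutive_occ_cycle longest_consecutive_occ_cycle_alt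
  rcases hpre with hs | ⟨hz, hc⟩
  · exact (pvSim cycle size L hs (L.length + 2)).1 0 0 (by omega) (by omega)
  · subst hz
    rw [pvAOuter_zero cycle L hc, pvBLoop_zero cycle L hc]
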